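-- pv_equiv track=rewrite | github.com/SvartKaffe/PCR-primers | primer_algorithms.py | unique_primers
-- ===== SOURCE A (Python) =====
-- def unique_primers(primers: dict, delta_t: int) -> dict:
--     """
--     aligns all primers to all other primers in the dictionary and only keeps the primers outside the specified
--     delta_t value. This functions was really never used, was intended for the brute force solution.
--     :param primers: dictionary containing primers
--     :param delta_t: Ta
--     :return: dictionary with primers
--     """
--     new_primers = {}
--     for primer, values in primers.items():
--         good_primer = True
--         for primer2 in primers:
--             if not primer == primer2:
--                 i = 0
--                 temp_difference = 0
--                 min_value = min(len(primer), len(primer2)) - 1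
--                 while i <= min_value:
--                     if primer[i] != primer2[i]:
--                         if primer2[i] == ("A" or "T"):
--                             temp_difference += 2
--                         else:
--                             temp_difference += 4
--
--                     if temp_difference > delta_t:
--                         break
--
--                     i += 1
--                 if temp_difference < delta_t:
--                     good_primer = False
--                     break
--
--         if good_primer:
--             new_primers[primer] = values
--
--     return new_primers
-- ===== SOURCE B (Python) =====
-- def _w(ca, cb):
--     """weight contributed at one position: 0 unless both chars exist and differ
--     (keeps A's `== ("A" or "T")` -> "A" quirk)"""
--     if ca is None or cb is None or ca == cb:
--         return 0
--     return 2 if cb == "A" else 4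
--
--
-- def unique_primers(primers: dict, delta_t: int) -> dict:
--     # position-major: build the full n x n distance matrix one character column
--     # at a time, then filter primers whose whole row clears delta_t
--     names = list(primers)
--     n = len(names)
--     maxlen = max(map(len, names), default=0)
--     dist = [[0] * n for _ in range(n)]
--     for i in range(maxlen):
--         col = [(p[i] if i < len(p) else None) for p in names]
--         dist = [[dist[a][b] + _w(col[a], col[b]) for b in range(n)]
--                 for a in range(n)]
--     return {p: v for a, (p, v) in enumerate(primers.items())
--             if all(names[b] == p or dist[a][b] >= delta_t for b in range(n))}
-- ===== Notes on version B (the rewrite author's own statement) =====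
-- stated objective: alternative
-- what changed: B is position-major: it builds an n-by-n weighted distance matrix one character column at a time (outer loop over string positions, matrix rebuilt functionally each column), then filters primers whose whole matrix row clears delta_t, instead of A's per-pair while loops with a flag and double break.
import Mathlib
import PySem

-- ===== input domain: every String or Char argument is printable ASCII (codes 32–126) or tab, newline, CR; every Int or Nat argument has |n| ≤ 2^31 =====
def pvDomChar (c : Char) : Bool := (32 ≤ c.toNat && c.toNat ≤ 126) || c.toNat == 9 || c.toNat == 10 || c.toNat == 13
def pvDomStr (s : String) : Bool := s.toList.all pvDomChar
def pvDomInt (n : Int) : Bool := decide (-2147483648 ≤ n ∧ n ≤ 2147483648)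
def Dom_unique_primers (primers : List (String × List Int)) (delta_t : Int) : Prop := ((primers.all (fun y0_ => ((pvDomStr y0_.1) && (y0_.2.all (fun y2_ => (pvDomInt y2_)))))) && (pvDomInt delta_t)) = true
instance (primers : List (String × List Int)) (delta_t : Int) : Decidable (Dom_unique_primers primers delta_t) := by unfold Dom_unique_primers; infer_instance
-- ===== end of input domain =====

-- B replaces A's per-pair flag/double-break loops by a position-major pass: an n x n
-- weighted distance matrix built one character column at a time, then a row filter
-- (objective: alternative; same asymptotic cost).


-- ===== PORT A =====
-- A's inner while loop over i = 0 .. min(len)-1 with its early `break` when the running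
-- difference exceeds delta_t; ported as the obvious structural recursion over the two
-- character lists (same positions, same running state `temp`).
def aWhile (p1 p2 : List Char) (delta_t : Int) (temp : Int) : Int :=
  match p1, p2 with
  | c1 :: r1, c2 :: r2 =>
      let temp := if c1 ≠ c2 then (if c2 = 'A' then temp + 2 else temp + 4) else temp
      if temp > delta_t then temp else aWhile r1 r2 delta_t temp
  | _, _ => temp

-- A's inner for-loop over all primers with the `good_primer` flag and its early `break`.
def aGoodLoop (rest : List (String × List Int)) (primer : String) (delta_t : Int) : Bool :=
  match rest with
  | [] => true
  | (primer2, _) :: rest =>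
      if primer ≠ primer2 then
        if aWhile primer.toList primer2.toList delta_t 0 < delta_t then false
        else aGoodLoop rest primer delta_t
      else aGoodLoop rest primer delta_t

def unique_primers (primers : List (String × List Int)) (delta_t : Int) : List (String × List Int) :=
  primers.foldl
    (fun new_primers pv =>
      if aGoodLoop primers pv.1 delta_t then new_primers ++ [pv] else new_primers)
    []

-- ===== PORT B =====
-- B's `_w`: the weight one character column contributes to one matrix entry
def bW (ca cb : Option Char) : Int :=
  match ca, cb with
  | some a, some b => if a = b then 0 else if b = 'A' then 2 else 4
  | _, _ => 0

-- one iteration of B's `for i in range(maxlen)` loop: rebuild the matrix from column i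
def bStep (names : List String) (n : Nat) (dist : List (List Int)) (i : Nat) : List (List Int) :=
  let col := names.map (fun p => p.toList[i]?)
  (List.range n).map (fun a => (List.range n).map (fun b =>
      (dist.getD a []).getD b 0 + bW (col.getD a none) (col.getD b none)))

def unique_primers_alt (primers : List (String × List Int)) (delta_t : Int) : List (String × List Int) :=
  let names := primers.map Prod.fst
  let n := names.length
  let maxlen := names.foldl (fun m p => max m p.toList.length) 0
  let dist := (List.range maxlen).foldl (bStep names n) (List.replicate n (List.replicate n 0))
  (primers.zipIdx.filter (fun x =>
      (List.range n).all (fun b =>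
        names.getD b "" == x.1.1 || delta_t ≤ (dist.getD x.2 []).getD b 0))).map Prod.fst

-- ===== PRECONDITION & SPEC =====
def Spec_unique_primers (primers : List (String × List Int)) (delta_t : Int) (out : List (String × List Int)) : Prop := out = unique_primers_alt primers delta_t
instance (primers : List (String × List Int)) (delta_t : Int) (out : List (String × List Int)) : Decidable (Spec_unique_primers primers delta_t out) := by unfold Spec_unique_primers; infer_instance

-- ===== CLAIM (what is proved, stated in full; the proofs are below) =====
def Claim_equal_unique_primers : Prop := ∀ (primers : List (String × List Int)) (delta_t : Int), Dom_unique_primers primers delta_t → Spec_unique_primers primers delta_t (unique_primers primers delta_t)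

-- ===== LEMMAS AND PROOFS =====

-- proof-side bridge: the full weighted mismatch distance over the common prefix
def bDist (p1 p2 : List Char) : Int :=
  match p1, p2 with
  | c1 :: r1, c2 :: r2 =>
      (if c1 ≠ c2 then (if c2 = 'A' then (2 : Int) else 4) else 0) + bDist r1 r2
  | _, _ => 0

theorem bDist_nonneg (p1 p2 : List Char) : 0 ≤ bDist p1 p2 := by
  induction p1 generalizing p2 with
  | nil => simp [bDist]
  | cons c1 r1 ih =>
    cases p2 with
    | nil => simp [bDist]
    | cons c2 r2 =>
      have := ih r2
      simp only [bDist]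
      split_ifs <;> omega

-- A's capped accumulation decides `< delta_t` exactly as the full distance does.
theorem aWhile_lt_iff (p1 p2 : List Char) (d t : Int) :
    (aWhile p1 p2 d t < d) ↔ (t + bDist p1 p2 < d) := by
  induction p1 generalizing p2 t with
  | nil => simp [aWhile, bDist]
  | cons c1 r1 ih =>
    cases p2 with
    | nil => simp [aWhile, bDist]
    | cons c2 r2 =>
      have hnn := bDist_nonneg r1 r2
      simp only [aWhile, bDist]
      split_ifs <;> (try simp only [ih]) <;> omega

-- A's flagged inner loop with break = the element-wise distance test.
theorem aGoodLoop_eq_all (rest : List (String × List Int)) (p : String) (d : Int) :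
    aGoodLoop rest p d
      = rest.all (fun pv2 => pv2.1 == p || d ≤ bDist p.toList pv2.1.toList) := by
  induction rest with
  | nil => rfl
  | cons hd tl ih =>
    obtain ⟨p2, v2⟩ := hd
    simp only [aGoodLoop, List.all_cons, ih]
    by_cases hne : p = p2
    · simp [hne]
    · rw [if_pos hne]
      have hlt := aWhile_lt_iff p.toList p2.toList d 0
      have hbe : (p2 == p) = false := by simpa using Ne.symm hne
      by_cases hc : aWhile p.toList p2.toList d 0 < d
      · have hnd : ¬ (d ≤ bDist p.toList p2.toList) := by
          have := hlt.mp hc; omega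
        simp [hc, hbe, hnd]
      · have hd2 : d ≤ bDist p.toList p2.toList := by
          by_contra hcon
          exact hc (hlt.mpr (by omega))
        simp [hc, hbe, hd2]

theorem foldl_filter (pred : (String × List Int) → Bool)
    (l acc : List (String × List Int)) :
    l.foldl (fun new pv => if pred pv then new ++ [pv] else new) acc
      = acc ++ l.filter pred := by
  induction l generalizing acc with
  | nil => simp
  | cons hd tl ih =>
    simp only [List.foldl_cons, List.filter_cons]
    by_cases h : pred hd <;> simp [h, ih]

-- partial distance: sum of the first m column weights
def pd (m : Nat) (p q : List Char) : Int :=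
  ((List.range m).map (fun i => bW p[i]? q[i]?)).sum

theorem bW_none_right (x : Option Char) : bW x none = 0 := by cases x <;> rfl

theorem pd_succ (m : Nat) (p q : List Char) :
    pd (m + 1) p q = pd m p q + bW p[m]? q[m]? := by
  simp [pd, List.range_succ]

theorem pd_nil_left (m : Nat) (q : List Char) : pd m [] q = 0 := by
  simp [pd, bW]

theorem pd_nil_right (m : Nat) (p : List Char) : pd m p [] = 0 := by
  simp [pd, bW_none_right]

theorem pd_cons (m : Nat) (c1 c2 : Char) (r1 r2 : List Char) :
    pd (m + 1) (c1 :: r1) (c2 :: r2) = bW (some c1) (some c2) + pd m r1 r2 := by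
  simp [pd, List.range_succ_eq_map, List.map_map, Function.comp_def]

theorem pd_eq_bDist (p q : List Char) (m : Nat)
    (h : min p.length q.length ≤ m) : pd m p q = bDist p q := by
  induction p generalizing q m with
  | nil => simp [pd_nil_left, bDist]
  | cons c1 r1 ih =>
    cases q with
    | nil => simp [pd_nil_right, bDist]
    | cons c2 r2 =>
      cases m with
      | zero => simp at h
      | succ m' =>
        rw [pd_cons, bDist, ih r2 m' (by simp at h ⊢; omega)]
        by_cases hc : c1 = c2 <;> simp [bW, hc]

-- closed form of B's matrix after the first m character columns
def matClosed (names : List String) (m : Nat) : List (List Int) :=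
  (List.range names.length).map (fun a => (List.range names.length).map (fun b =>
    pd m (names.getD a "").toList (names.getD b "").toList))

theorem getD_map_range {α : Type} (n a : Nat) (f : Nat → α) (d : α) (h : a < n) :
    ((List.range n).map f).getD a d = f a := by
  simp [List.getD_eq_getElem?_getD, h]

theorem getD_map_toList (names : List String) (a : Nat) (g : String → Option Char)
    (hg : g "" = none) :
    (names.map g).getD a none = g (names.getD a "") := by
  simp only [List.getD_eq_getElem?_getD, List.getElem?_map]
  cases h : names[a]? <;> simp [hg]

theorem bStep_closed (names : List String) (m : Nat) :
    bStep names names.length (matClosed names m) m = matClosed names (m + 1) := by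
  simp only [bStep, matClosed]
  refine List.map_congr_left (fun a ha => ?_)
  refine List.map_congr_left (fun b hb => ?_)
  simp only [List.mem_range] at ha hb
  rw [getD_map_range _ _ _ _ ha, getD_map_range _ _ _ _ hb,
      getD_map_toList names a _ (by rfl), getD_map_toList names b _ (by rfl), pd_succ]

theorem bFold_closed (names : List String) (m : Nat) :
    (List.range m).foldl (bStep names names.length)
        (List.replicate names.length (List.replicate names.length 0))
      = matClosed names m := by
  induction m with
  | zero =>
    simp [matClosed, pd, List.map_const']
  | succ m ih =>
    rw [List.range_succ, List.foldl_append, List.foldl_cons, List.foldl_nil, ih, bStep_closed]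

theorem le_foldl_max (l : List String) (acc : Nat) :
    acc ≤ l.foldl (fun m p => max m p.toList.length) acc := by
  induction l generalizing acc with
  | nil => simp
  | cons a tl ih => exact le_trans (Nat.le_max_left _ _) (ih _)

theorem mem_le_foldl_max (l : List String) (acc : Nat) (p : String) (hp : p ∈ l) :
    p.toList.length ≤ l.foldl (fun m q => max m q.toList.length) acc := by
  induction l generalizing acc with
  | nil => cases hp
  | cons a tl ih =>
    rcases List.mem_cons.mp hp with rfl | h
    · exact le_trans (Nat.le_max_right _ _) (le_foldl_max _ _)
    · exact ih _ h

theorem all_congr' {α : Type} (l : List α) (f g : α → Bool) (h : ∀ x ∈ l, f x = g x) :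
    l.all f = l.all g := by
  induction l with
  | nil => rfl
  | cons a tl ih =>
    simp [List.all_cons, h a (by simp), ih (fun x hx => h x (by simp [hx]))]

theorem all_range_getD {α : Type} (l : List α) (P : α → Bool) (d : α) :
    (List.range l.length).all (fun b => P (l.getD b d)) = l.all P := by
  refine Bool.eq_iff_iff.mpr ?_
  simp only [List.all_eq_true, List.mem_range]
  constructor
  · intro h x hx
    obtain ⟨i, hi, rfl⟩ := List.mem_iff_getElem.mp hx
    simpa [List.getD_eq_getElem?_getD, List.getElem?_eq_getElem hi] using h i hi
  · intro h b hb
    have := h _ (List.getElem_mem hb)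
    simpa [List.getD_eq_getElem?_getD, List.getElem?_eq_getElem hb] using this

theorem filter_zipIdx_map {α : Type} (l : List α) (p : α × Nat → Bool) (q : α → Bool)
    (k : Nat) (h : ∀ i (hi : i < l.length), p (l[i], k + i) = q l[i]) :
    ((l.zipIdx k).filter p).map Prod.fst = l.filter q := by
  induction l generalizing k with
  | nil => rfl
  | cons a tl ih =>
    have h0 : p (a, k) = q a := by simpa using h 0 (by simp)
    have htl := ih (k + 1) (fun i hi => by
      have hstep := h (i + 1) (by simpa using Nat.succ_lt_succ hi)
      have e : k + (i + 1) = (k + 1) + i := by omega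
      rw [e] at hstep
      simpa using hstep)
    simp only [List.zipIdx_cons, List.filter_cons, h0]
    by_cases hq : q a <;> simp [hq, htl]

theorem all_names (primers : List (String × List Int)) (P : String → Bool) :
    ((List.range (primers.map Prod.fst).length).all
       (fun b => P ((primers.map Prod.fst).getD b ""))) = primers.all (fun pv => P pv.1) := by
  rw [all_range_getD, List.all_map]
  rfl

-- ===== VERDICT (by name: the statement is the Claim_ definition above) =====
theorem unique_primers_spec : Claim_equal_unique_primers := by
  intro primers delta_t _
  unfold Spec_unique_primers
  simp only [unique_primers, unique_primers_alt]
  rw [foldl_filter, List.nil_append, bFold_closed]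
  refine Eq.symm (filter_zipIdx_map primers _ (fun pv => aGoodLoop primers pv.1 delta_t) 0 ?_)
  intro i hi
  simp only [Nat.zero_add]
  rw [aGoodLoop_eq_all]
  have hi' : i < (primers.map Prod.fst).length := by simpa using hi
  have hname_i : (primers.map Prod.fst).getD i "" = primers[i].1 := by
    simp [List.getD_eq_getElem?_getD, List.getElem?_map, List.getElem?_eq_getElem hi]
  rw [all_congr' _ _
      (fun b => (primers.map Prod.fst).getD b "" == primers[i].1
        || delta_t ≤ bDist (primers[i].1).toList ((primers.map Prod.fst).getD b "").toList)
      ?_]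
  · exact all_names primers
      (fun x => x == primers[i].1 || delta_t ≤ bDist (primers[i].1).toList x.toList)
  · intro b hb
    simp only [List.mem_range] at hb
    have hmem : (primers.map Prod.fst).getD b "" ∈ primers.map Prod.fst := by
      rw [List.getD_eq_getElem?_getD, List.getElem?_eq_getElem hb]
      exact List.getElem_mem hb
    have h1 : ∀ (f : Nat → List Int) (d : List Int),
        ((List.range (primers.map Prod.fst).length).map f).getD i d = f i :=
      fun f d => getD_map_range _ _ f d hi'
    have h2 : ∀ (f : Nat → Int) (d : Int),
        ((List.range (primers.map Prod.fst).length).map f).getD b d = f b :=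
      fun f d => getD_map_range _ _ f d hb
    simp only [matClosed, h1, h2, hname_i]
    have hpd := pd_eq_bDist primers[i].1.toList ((primers.map Prod.fst).getD b "").toList _
      (le_trans (min_le_right _ _) (mem_le_foldl_max _ 0 _ hmem))
    simp only [hpd]
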